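-- pv_equiv track=rewrite | github.com/dantiston/GrammarMatrix | gmcs/utils.py | TDLencode
-- ===== SOURCE A (Python) =====
-- def TDLencode(string):
--   """
--   Encode a string in such a way as to make it a legal TDL type name
--   """
--   val = ''
--   for c in string:
--     if not (c.isalnum() or ord(c) > 127 or c in (u'_', u'-', u'+', u'*')):
--       val += u'%' + u'%2X' % (ord(c))
--     else:
--       val += c
--
--   return val
-- ===== SOURCE B (Python) =====
-- _TABLE = {i: '%' + '%2X' % i
--           for i in range(128)
--           if not (chr(i).isalnum() or chr(i) in ('_', '-', '+', '*'))}
--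
-- def TDLencode(string):
--   """
--   Encode a string in such a way as to make it a legal TDL type name
--   """
--   return string.translate(_TABLE)
-- ===== Notes on version B (the rewrite author's own statement) =====
-- stated objective: idiomatic
-- what changed: Replaces the per-character if/else string-concatenation loop by a translation table (code point -> '%'+'%2X' encoding) built once over ASCII 0..127 and a single str.translate pass.
import Mathlib
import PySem

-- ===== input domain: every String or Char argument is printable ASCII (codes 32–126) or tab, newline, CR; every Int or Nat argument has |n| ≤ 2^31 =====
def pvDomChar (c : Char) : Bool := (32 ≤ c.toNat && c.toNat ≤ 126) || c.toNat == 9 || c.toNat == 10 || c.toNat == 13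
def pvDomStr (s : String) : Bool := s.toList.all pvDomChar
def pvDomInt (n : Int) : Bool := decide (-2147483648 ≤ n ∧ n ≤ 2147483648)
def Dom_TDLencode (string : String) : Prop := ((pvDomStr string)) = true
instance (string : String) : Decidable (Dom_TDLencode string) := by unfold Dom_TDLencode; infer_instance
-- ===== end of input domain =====

-- B replaces A's per-character if/else concatenation loop by a translation table built
-- once over the ASCII code points and a single translate pass (objective: idiomatic).

-- shared helper: Python's "'%2X' % n" (width 2, space-padded, uppercase hex);
-- exact for 0 ≤ n < 256, which covers every code point the ports apply it to on Dom
def pvHexDigit (n : Nat) : Char := if n < 10 then Char.ofNat (48 + n) else Char.ofNat (55 + n)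
def pvHex2X (n : Nat) : String :=
  if n < 16 then String.ofList [' ', pvHexDigit n]
  else String.ofList [pvHexDigit (n / 16 % 16), pvHexDigit (n % 16)]

-- ===== PORT A =====
def TDLencode (string : String) : String :=
  string.toList.foldl (fun val c =>
    if ¬ (PySem.Chars.isalnum c || decide (c.toNat > 127) ||
          (c == '_' || c == '-' || c == '+' || c == '*')) then
      val ++ ("%" ++ pvHex2X c.toNat)
    else
      val ++ String.ofList [c]) ""

-- ===== PORT B =====
-- the translation table: code point ↦ '%' + '%2X' encoding, for the non-allowed ASCII chars
def pvTable : PySem.Dict Int String :=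
  (PySem.List.pyRange 0 128 1).foldl (fun d i =>
    let c := Char.ofNat i.toNat
    if ¬ (PySem.Chars.isalnum c || (c == '_' || c == '-' || c == '+' || c == '*')) then
      d.insert i ("%" ++ pvHex2X i.toNat)
    else d) PySem.Dict.empty

-- str.translate: each char is replaced by its table entry, absent chars pass through
def TDLencode_alt (string : String) : String :=
  String.join (string.toList.map (fun c => (pvTable.get? (c.toNat : Int)).getD (String.ofList [c])))

-- ===== PRECONDITION & SPEC =====
def Spec_TDLencode (string : String) (out : String) : Prop := out = TDLencode_alt string
instance (string : String) (out : String) : Decidable (Spec_TDLencode string out) := by unfold Spec_TDLencode; infer_instance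

-- ===== CLAIM (what is proved, stated in full; the proofs are below) =====
def Claim_equal_TDLencode : Prop := ∀ (string : String), Dom_TDLencode string → Spec_TDLencode string (TDLencode string)

-- ===== LEMMAS AND PROOFS =====

-- A's loop body, per character
def pvStepA (c : Char) : String :=
  if ¬ (PySem.Chars.isalnum c || decide (c.toNat > 127) ||
        (c == '_' || c == '-' || c == '+' || c == '*')) then
    "%" ++ pvHex2X c.toNat
  else String.ofList [c]

-- B's per-character result
def pvStepB (c : Char) : String := (pvTable.get? (c.toNat : Int)).getD (String.ofList [c])

-- the table-building step, named
def pvAllowed (i : Int) : Bool :=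
  PySem.Chars.isalnum (Char.ofNat i.toNat) ||
    (Char.ofNat i.toNat == '_' || Char.ofNat i.toNat == '-' ||
     Char.ofNat i.toNat == '+' || Char.ofNat i.toNat == '*')

def pvEnc (i : Int) : String := "%" ++ pvHex2X i.toNat

theorem pvTable_get?_fold (L : List Int) (d : PySem.Dict Int String) (j : Int) :
    (L.foldl (fun d i => if ¬ pvAllowed i then d.insert i (pvEnc i) else d) d).get? j
      = if j ∈ L ∧ ¬ pvAllowed j then some (pvEnc j) else d.get? j := by
  induction L generalizing d with
  | nil => simp
  | cons i L ih =>
    simp only [List.foldl_cons]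
    by_cases ha' : pvAllowed i
    · rw [if_neg (by simp [ha']), ih]
      by_cases hji : j = i
      · subst hji; simp [ha']
      · simp [hji]
    · rw [if_pos (by simp [ha']), ih]
      by_cases hji : j = i
      · subst hji
        by_cases hm : j ∈ L <;>
          simp [ha', hm, PySem.Dict.get?_insert_self]
      · rw [PySem.Dict.get?_insert_of_ne _ _ hji]
        simp [hji]

theorem pvTable_get? (j : Int) :
    pvTable.get? j
      = if (0 ≤ j ∧ j < 128) ∧ ¬ pvAllowed j then some (pvEnc j) else none := by
  have hT : pvTable
      = (PySem.List.pyRange 0 128 1).foldl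
          (fun d i => if ¬ pvAllowed i then d.insert i (pvEnc i) else d) PySem.Dict.empty := rfl
  rw [hT, pvTable_get?_fold]
  simp [PySem.List.mem_pyRange_one]

theorem pvStep_eq (c : Char) : pvStepA c = pvStepB c := by
  unfold pvStepA pvStepB
  rw [pvTable_get?]
  have hA : pvAllowed (c.toNat : Int)
      = (PySem.Chars.isalnum c || (c == '_' || c == '-' || c == '+' || c == '*')) := by
    simp [pvAllowed, Char.ofNat_toNat]
  have hE : pvEnc (c.toNat : Int) = "%" ++ pvHex2X c.toNat := by
    simp [pvEnc]
  by_cases h : c.toNat < 128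
  · have hb : decide (c.toNat > 127) = false := by simp; omega
    rw [hA, hE, hb]
    by_cases ha : (PySem.Chars.isalnum c || (c == '_' || c == '-' || c == '+' || c == '*')) = true
    · simp [ha]
    · have hrange : (0 ≤ (c.toNat : Int) ∧ (c.toNat : Int) < 128) := by
        constructor
        · positivity
        · exact_mod_cast h
      simp [ha, hrange]
  · have hb : decide (c.toNat > 127) = true := by simp; omega
    simp [hb, h]

theorem pvFoldlAppend (l : List String) (a : String) :
    l.foldl (fun r s => r ++ s) a = a ++ l.foldl (fun r s => r ++ s) "" := by
  induction l generalizing a with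
  | nil => simp
  | cons x l ih =>
    simp only [List.foldl_cons]
    rw [ih (a ++ x), ih ("" ++ x), String.append_assoc]
    simp

theorem pvJoinCons (x : String) (xs : List String) :
    String.join (x :: xs) = x ++ String.join xs := by
  simp only [String.join, List.foldl_cons]
  rw [pvFoldlAppend]
  simp

theorem TDLencode_foldl (l : List Char) (acc : String) :
    l.foldl (fun val c => val ++ pvStepA c) acc
      = acc ++ String.join (l.map pvStepB) := by
  induction l generalizing acc with
  | nil => simp [String.join]
  | cons c l ih =>
    rw [List.foldl_cons, ih, pvStep_eq c, List.map_cons, pvJoinCons,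
      String.append_assoc]

-- ===== VERDICT (by name: the statement is the Claim_ definition above) =====
theorem TDLencode_spec : Claim_equal_TDLencode := by
  intro s _
  unfold Spec_TDLencode TDLencode TDLencode_alt
  have hbody : (fun (val : String) (c : Char) =>
      if ¬ (PySem.Chars.isalnum c || decide (c.toNat > 127) ||
            (c == '_' || c == '-' || c == '+' || c == '*')) then
        val ++ ("%" ++ pvHex2X c.toNat)
      else val ++ String.ofList [c])
      = (fun val c => val ++ pvStepA c) := by
    funext val c
    simp only [pvStepA]
    split <;> rfl
  rw [hbody, TDLencode_foldl s.toList ""]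
  have hmap : List.map pvStepB s.toList
      = List.map (fun c => (pvTable.get? (c.toNat : Int)).getD (String.ofList [c])) s.toList := rfl
  rw [hmap]
  simp
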